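-- pv_equiv track=rewrite | github.com/tariq-hasan/leetcode | coding_patterns/12-backtracking/02-permutation-patterns/medium_47_permutations_ii.py | permuteUnique_v2
-- ===== SOURCE A (Python) =====
-- from collections import Counter
--
-- def permuteUnique_v2(nums):
--     """
--     Using Counter to track available numbers - cleaner duplicate handling
--     """
--     result = []
--     counter = Counter(nums)
--     current = []
--
--     def backtrack():
--         if len(current) == len(nums):
--             result.append(current[:])
--             return
--
--         # Try each unique number
--         for num in counter:
--             if counter[num] > 0:
--                 # Choose
--                 current.append(num)
--                 counter[num] -= 1
--
--                 # Explore
--                 backtrack()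
--
--                 # Unchoose
--                 current.pop()
--                 counter[num] += 1
--
--     backtrack()
--     return result
-- ===== SOURCE B (Python) =====
-- from collections import Counter
--
-- def permuteUnique_v2(nums):
--     """Value-returning recursion over a Counter (returns the list of permutations)
--     instead of shared-accumulator backtracking."""
--     def perm(counter, remaining):
--         if remaining == 0:
--             return [[]]
--         result = []
--         for v in counter:
--             if counter[v] > 0:
--                 sub = counter.copy()
--                 sub[v] -= 1
--                 result += [[v] + p for p in perm(sub, remaining - 1)]
--         return result
--     return perm(Counter(nums), len(nums))
-- ===== Notes on version B (the rewrite author's own statement) =====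
-- stated objective: alternative
-- what changed: Replaced A's shared-accumulator backtracking (mutating a current path and a result list, with choose/unchoose steps) by a pure value-returning recursion perm(counter, remaining) that builds and concatenates the sub-permutation lists, preserving A's Counter insertion-order output.
import Mathlib
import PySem

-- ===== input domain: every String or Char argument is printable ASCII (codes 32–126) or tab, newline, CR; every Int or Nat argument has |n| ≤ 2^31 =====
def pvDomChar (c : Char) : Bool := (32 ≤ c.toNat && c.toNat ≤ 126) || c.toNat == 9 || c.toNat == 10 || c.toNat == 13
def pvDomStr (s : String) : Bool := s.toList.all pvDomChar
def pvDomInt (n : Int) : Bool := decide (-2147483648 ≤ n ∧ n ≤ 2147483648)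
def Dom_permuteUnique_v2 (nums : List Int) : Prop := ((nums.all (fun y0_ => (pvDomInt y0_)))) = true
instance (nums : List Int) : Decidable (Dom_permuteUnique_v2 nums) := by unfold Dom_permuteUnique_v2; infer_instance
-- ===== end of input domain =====

-- B rewrites A's mutate-and-undo backtracking as a pure value-returning recursion over the Counter (objective: alternative decomposition; same output order).

-- ===== PORT A =====
-- A's nested `backtrack`: mutates `current`/`counter`/`result`; ported with the
-- post-loop-restored counter passed explicitly. `fuel` only makes the recursion
-- structural; the Python recursion depth is bounded by len(nums), so fuel = nums.length suffices.
def pvBtA (n : Nat) (counter : PySem.Dict Int Int) (current : List Int)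
    (result : List (List Int)) (fuel : Nat) : List (List Int) :=
  if current.length = n then result ++ [current]
  else
    match fuel with
    | 0 => result
    | fuel + 1 =>
      counter.keys.foldl
        (fun res num =>
          if 0 < counter.getD num 0 then
            pvBtA n (counter.modify num 0 (· - 1)) (current ++ [num]) res fuel
          else res)
        result

def permuteUnique_v2 (nums : List Int) : List (List Int) :=
  pvBtA nums.length (PySem.Dict.counter nums) [] [] nums.length

-- ===== PORT B =====
-- Source B's perm(counter, remaining): value-returning recursion, structural in `remaining`.
def pvPerm (counter : PySem.Dict Int Int) (remaining : Nat) : List (List Int) :=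
  match remaining with
  | 0 => [[]]
  | r + 1 =>
    counter.keys.foldl
      (fun acc v =>
        if 0 < counter.getD v 0 then
          acc ++ (pvPerm (counter.modify v 0 (· - 1)) r).map (fun p => v :: p)
        else acc)
      []

def permuteUnique_v2_alt (nums : List Int) : List (List Int) :=
  pvPerm (PySem.Dict.counter nums) nums.length

-- ===== PRECONDITION & SPEC =====
def Spec_permuteUnique_v2 (nums : List Int) (out : List (List Int)) : Prop := out = permuteUnique_v2_alt nums
instance (nums : List Int) (out : List (List Int)) : Decidable (Spec_permuteUnique_v2 nums out) := by unfold Spec_permuteUnique_v2; infer_instance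

-- ===== CLAIM (what is proved, stated in full; the proofs are below) =====
def Claim_equal_permuteUnique_v2 : Prop := ∀ (nums : List Int), Dom_permuteUnique_v2 nums → Spec_permuteUnique_v2 nums (permuteUnique_v2 nums)

-- ===== LEMMAS AND PROOFS =====

-- A's fold with accumulator `result` equals `result ++` the flatMap of per-key contributions.
theorem pvBtA_fold_flatMap (r : Nat) (counter : PySem.Dict Int Int) (current : List Int)
    (n : Nat)
    (IH : ∀ (c : PySem.Dict Int Int) (cur : List Int) (res : List (List Int)),
      cur.length + r = n → pvBtA n c cur res r = res ++ (pvPerm c r).map (fun p => cur ++ p))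
    (hlen : current.length + (r + 1) = n) :
    ∀ (l : List Int) (result : List (List Int)),
      l.foldl
        (fun res num =>
          if 0 < counter.getD num 0 then
            pvBtA n (counter.modify num 0 (· - 1)) (current ++ [num]) res r
          else res) result
      = result ++ l.flatMap
          (fun num =>
            if 0 < counter.getD num 0 then
              (pvPerm (counter.modify num 0 (· - 1)) r).map (fun p => (current ++ [num]) ++ p)
            else []) := by
  intro l
  induction l with
  | nil => intro result; simp
  | cons x xs ih =>
    intro result
    simp only [List.foldl_cons, List.flatMap_cons]
    by_cases hx : 0 < counter.getD x 0
    · rw [if_pos hx, ih, IH (counter.modify x 0 (· - 1)) (current ++ [x]) result (by simp; omega)]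
      simp [hx, List.append_assoc]
    · rw [if_neg hx, ih]
      simp [hx]

-- B's fold with accumulator equals the flatMap of per-key contributions.
theorem pvPerm_fold_flatMap (r : Nat) (counter : PySem.Dict Int Int) :
    ∀ (l : List Int) (acc : List (List Int)),
      l.foldl
        (fun acc v =>
          if 0 < counter.getD v 0 then
            acc ++ (pvPerm (counter.modify v 0 (· - 1)) r).map (fun p => v :: p)
          else acc) acc
      = acc ++ l.flatMap
          (fun v =>
            if 0 < counter.getD v 0 then
              (pvPerm (counter.modify v 0 (· - 1)) r).map (fun p => v :: p)
            else []) := by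
  intro l
  induction l with
  | nil => intro acc; simp
  | cons x xs ih =>
    intro acc
    simp only [List.foldl_cons, List.flatMap_cons]
    by_cases hx : 0 < counter.getD x 0
    · rw [if_pos hx, ih]; simp [hx]
    · rw [if_neg hx, ih]; simp [hx]

-- Main invariant: with remaining = n - |current|, A's backtracking from `result`
-- produces `result ++` B's permutation list, each prefixed with `current`.
theorem pvBtA_eq_pvPerm : ∀ (r : Nat) (counter : PySem.Dict Int Int)
    (current : List Int) (result : List (List Int)) (n : Nat),
    current.length + r = n →
    pvBtA n counter current result r = result ++ (pvPerm counter r).map (fun p => current ++ p) := by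
  intro r
  induction r with
  | zero =>
    intro counter current result n hlen
    unfold pvBtA pvPerm
    simp [← hlen]
  | succ r ih =>
    intro counter current result n hlen
    unfold pvBtA
    rw [if_neg (by omega)]
    show List.foldl
        (fun res num =>
          if 0 < counter.getD num 0 then
            pvBtA n (counter.modify num 0 (· - 1)) (current ++ [num]) res r
          else res) result counter.keys = _
    rw [pvBtA_fold_flatMap r counter current n (fun c cur res h => ih c cur res n h) hlen]
    conv_rhs => rw [pvPerm]
    rw [pvPerm_fold_flatMap r counter]
    simp only [List.nil_append, List.map_flatMap]
    congr 1
    congr 1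
    funext num
    by_cases hx : 0 < counter.getD num 0
    · simp only [if_pos hx, List.map_map]
      exact List.map_congr_left (fun p _ => by simp)
    · simp [hx]

-- ===== VERDICT (by name: the statement is the Claim_ definition above) =====
theorem permuteUnique_v2_spec : Claim_equal_permuteUnique_v2 := by
  intro nums _
  show permuteUnique_v2 nums = permuteUnique_v2_alt nums
  unfold permuteUnique_v2 permuteUnique_v2_alt
  simpa using pvBtA_eq_pvPerm nums.length (PySem.Dict.counter nums) [] [] nums.length (by simp)
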